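-- pv_equiv track=rewrite | github.com/JaysreeSS/blosmia-app | database/plan.py | contiguous_3way_split
-- ===== SOURCE A (Python) =====
-- def contiguous_3way_split(items):
--     """
--     Contiguously split a list into 3 slices for the 3 patients:
--     First slice gets the first extra if remainder exists (e.g., 76 -> 26,25,25).
--     Returns a list of 3 sublists.
--     """
--     n = len(items)
--     base = n // 3
--     rem = n % 3
--     sizes = [base + (1 if i < rem else 0) for i in range(3)]
--     slices = []
--     start = 0
--     for sz in sizes:
--         end = start + sz
--         slices.append(items[start:end])
--         start = end
--     return slices
-- ===== SOURCE B (Python) =====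
-- def contiguous_3way_split(items):
--     """Closed-form boundaries: first cut base+(1 if rem else 0), second cut n-base."""
--     n = len(items)
--     base = n // 3
--     b1 = base + (1 if n % 3 else 0)
--     b2 = n - base
--     return [items[:b1], items[b1:b2], items[b2:]]
-- ===== Notes on version B (the rewrite author's own statement) =====
-- stated objective: simpler
-- what changed: Replaced the sizes list and the offset-accumulating loop by closed-form cut points b1 = base + (1 if rem else 0) and b2 = n - base and three direct slices.
import Mathlib
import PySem

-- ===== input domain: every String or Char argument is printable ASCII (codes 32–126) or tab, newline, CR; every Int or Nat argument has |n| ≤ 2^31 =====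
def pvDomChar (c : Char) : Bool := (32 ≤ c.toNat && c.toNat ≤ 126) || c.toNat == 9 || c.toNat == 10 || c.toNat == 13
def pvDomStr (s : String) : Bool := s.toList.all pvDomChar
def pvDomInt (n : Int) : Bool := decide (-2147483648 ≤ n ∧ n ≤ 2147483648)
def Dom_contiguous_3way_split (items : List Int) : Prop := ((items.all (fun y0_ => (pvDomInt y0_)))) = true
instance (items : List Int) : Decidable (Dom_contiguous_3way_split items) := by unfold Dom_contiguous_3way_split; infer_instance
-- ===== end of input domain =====

-- B replaces A's sizes list and offset-accumulating loop with two closed-form cut points and three direct slices (simpler decomposition, same cost).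

-- ===== PORT A =====
def contiguous_3way_split (items : List Int) : List (List Int) :=
  let n : Int := items.length
  let base := PySem.Int.floordiv n 3
  let rem := PySem.Int.mod n 3
  let sizes := (PySem.List.pyRange 0 3 1).map (fun i => base + (if i < rem then 1 else 0))
  let res := sizes.foldl (fun (st : List (List Int) × Int) sz =>
      let endI := st.2 + sz
      (st.1 ++ [PySem.List.slice items (some st.2) (some endI)], endI)) ([], 0)
  res.1

-- ===== PORT B =====
def contiguous_3way_split_alt (items : List Int) : List (List Int) :=
  let n : Int := items.length
  let base := PySem.Int.floordiv n 3
  let b1 := base + (if PySem.Int.mod n 3 ≠ 0 then 1 else 0)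
  let b2 := n - base
  [PySem.List.slice items none (some b1),
   PySem.List.slice items (some b1) (some b2),
   PySem.List.slice items (some b2) none]

-- ===== PRECONDITION & SPEC =====
def Spec_contiguous_3way_split (items : List Int) (out : List (List Int)) : Prop := out = contiguous_3way_split_alt items
instance (items : List Int) (out : List (List Int)) : Decidable (Spec_contiguous_3way_split items out) := by unfold Spec_contiguous_3way_split; infer_instance

-- ===== CLAIM (what is proved, stated in full; the proofs are below) =====
def Claim_equal_contiguous_3way_split : Prop := ∀ (items : List Int), Dom_contiguous_3way_split items → Spec_contiguous_3way_split items (contiguous_3way_split items)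

-- ===== LEMMAS AND PROOFS =====

-- xs[a:len(xs)] = xs[a:] for 0 ≤ a
theorem slice_to_len (xs : List Int) (a : Int) (ha : 0 ≤ a) :
    PySem.List.slice xs (some a) (some (xs.length : Int)) = PySem.List.slice xs (some a) none := by
  rw [PySem.List.slice_toNat xs ha (by positivity), PySem.List.slice_from xs ha]
  apply List.take_of_length_le
  simp

-- ===== VERDICT (by name: the statement is the Claim_ definition above) =====
theorem contiguous_3way_split_spec : Claim_equal_contiguous_3way_split := by
  intro items _
  unfold Spec_contiguous_3way_split contiguous_3way_split contiguous_3way_split_alt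
  have hr : PySem.List.pyRange 0 3 1 = [0,1,2] := by decide
  simp only [hr, List.map, List.foldl, List.nil_append]
  set n : Int := (items.length : Int) with hn
  have hn0 : 0 ≤ n := by positivity
  have hdm := PySem.Int.floordiv_mul_add_mod n 3
  have hm0 := PySem.Int.mod_nonneg n (b := 3) (by omega)
  have hm3 := PySem.Int.mod_lt n (b := 3) (by omega)
  set base := PySem.Int.floordiv n 3 with hb
  set rem := PySem.Int.mod n 3 with hrm
  have hb0 : 0 ≤ base := by omega
  have hc : rem = 0 ∨ rem = 1 ∨ rem = 2 := by omega
  rcases hc with h | h | h <;> rw [h] <;> norm_num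
  · rw [show n - base = base + base from by omega]
    refine ⟨rfl, ?_⟩
    rw [show base + base + base = n from by omega, hn]
    exact slice_to_len items (base + base) (by omega)
  · rw [show n - base = base + 1 + base from by omega]
    refine ⟨rfl, ?_⟩
    rw [show base + 1 + base + base = n from by omega, hn]
    exact slice_to_len items (base + 1 + base) (by omega)
  · rw [show n - base = base + 1 + (base + 1) from by omega]
    refine ⟨rfl, ?_⟩
    rw [show base + 1 + (base + 1) + base = n from by omega, hn]
    exact slice_to_len items (base + 1 + (base + 1)) (by omega)
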